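-- pv_equiv track=rewrite | github.com/4ingers/Crypto-McNuggets | api/labs/tools/binaries.py | highest_power_of_2
-- ===== SOURCE A (Python) =====
-- def highest_power_of_2(num):
--   if num < 1:
--     return None
--
--   powered = (num & (~(num - 1)))
--   count = 0
--   while powered != 0:
--     powered >>= 1
--     count += 1
--
--   return count - 1
-- ===== SOURCE B (Python) =====
-- def highest_power_of_2(num):
--   if num < 1:
--     return None
--   count = 0
--   while num % 2 == 0:
--     num //= 2
--     count += 1
--   return count
-- ===== Notes on version B (the rewrite author's own statement) =====
-- stated objective: alternative
-- what changed: A isolates the lowest set bit with the mask num & ~(num-1) and then counts right-shifts of that mask until it is zero; B builds no mask at all and instead computes the 2-adic valuation of num directly, repeatedly dividing num by 2 while it is even and counting the divisions.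
import Mathlib
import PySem

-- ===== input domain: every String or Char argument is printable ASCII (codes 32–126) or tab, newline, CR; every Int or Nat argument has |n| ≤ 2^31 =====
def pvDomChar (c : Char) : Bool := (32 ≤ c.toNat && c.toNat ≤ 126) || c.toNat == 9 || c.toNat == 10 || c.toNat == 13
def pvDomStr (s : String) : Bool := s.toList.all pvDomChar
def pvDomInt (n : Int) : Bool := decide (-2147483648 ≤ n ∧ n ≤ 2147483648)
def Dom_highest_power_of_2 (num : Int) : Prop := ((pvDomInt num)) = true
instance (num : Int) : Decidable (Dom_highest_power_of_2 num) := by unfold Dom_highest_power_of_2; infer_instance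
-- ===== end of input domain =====

-- B replaces A's isolate-lowest-bit mask + shift-counting loop by a direct 2-adic valuation:
-- repeatedly halve num while it is even, counting the divisions (alternative algorithm, same cost).


-- ===== PORT A =====
-- Python's `while powered != 0: powered >>= 1; count += 1`.  The `powered ≤ 0` guard only
-- makes the recursion total: the loop is reached with powered = num & ~(num-1) for num ≥ 1,
-- which is nonnegative, so on reachable states the guard coincides with Python's `powered != 0`.
def hp2_loop (powered count : Int) : Int :=
  if _h : powered ≤ 0 then count
  else hp2_loop (powered >>> (1 : Nat)) (count + 1)
termination_by powered.toNat
decreasing_by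
  obtain ⟨n, rfl⟩ := Int.eq_ofNat_of_zero_le (show (0:Int) ≤ powered by omega)
  rw [show ((n : Int) >>> (1 : Nat)) = ((n >>> 1 : Nat) : Int) from rfl]
  simp only [Int.toNat_natCast, Nat.shiftRight_succ, Nat.shiftRight_zero]
  omega

def highest_power_of_2 (num : Int) : Option Int :=
  if num < 1 then none
  else some (hp2_loop (PySem.Int.band num (Int.not (num - 1))) 0 - 1)

-- ===== PORT B =====
-- Python's `while num % 2 == 0: num //= 2; count += 1`.  The `n ≤ 0` disjunct only makes the
-- recursion total: the loop is entered with num ≥ 1 and halving an even positive number keeps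
-- it ≥ 1, so on reachable states the guard coincides with Python's `num % 2 == 0`.
def tz_loop (n count : Int) : Int :=
  if _h : n ≤ 0 ∨ PySem.Int.mod n 2 ≠ 0 then count
  else tz_loop (PySem.Int.floordiv n 2) (count + 1)
termination_by n.toNat
decreasing_by
  rw [PySem.Int.floordiv_eq_ediv_of_pos (by norm_num)]
  omega

def highest_power_of_2_alt (num : Int) : Option Int :=
  if num < 1 then none
  else some (tz_loop num 0)

-- ===== PRECONDITION & SPEC =====
def Spec_highest_power_of_2 (num : Int) (out : Option Int) : Prop := out = highest_power_of_2_alt num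
instance (num : Int) (out : Option Int) : Decidable (Spec_highest_power_of_2 num out) := by unfold Spec_highest_power_of_2; infer_instance

-- ===== CLAIM (what is proved, stated in full; the proofs are below) =====
def Claim_equal_highest_power_of_2 : Prop := ∀ (num : Int), Dom_highest_power_of_2 num → Spec_highest_power_of_2 num (highest_power_of_2 num)

-- ===== LEMMAS AND PROOFS =====

theorem int_not_eq (y : Int) : Int.not y = -y - 1 := by
  cases y <;> simp [Int.not] <;> omega

theorem shiftRight_one_nonneg (p : Int) (h : 0 ≤ p) :
    p >>> (1 : Nat) = PySem.Int.floordiv p 2 := by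
  obtain ⟨n, rfl⟩ := Int.eq_ofNat_of_zero_le h
  rw [show ((n : Int) >>> (1 : Nat)) = ((n >>> 1 : Nat) : Int) from rfl]
  simp [Nat.shiftRight_succ]

theorem hp2_loop_eq : ∀ (n : Nat) (p c : Int), 0 ≤ p → p.toNat ≤ n →
    hp2_loop p c = c + (PySem.Int.bitLength p : Int) := by
  intro n
  induction n with
  | zero =>
    intro p c hp hn
    have hp0 : p = 0 := by omega
    subst hp0
    rw [hp2_loop]
    simp [PySem.Int.bitLength_zero]
  | succ n ih =>
    intro p c hp hn
    by_cases h : p ≤ 0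
    · have hp0 : p = 0 := le_antisymm h hp
      subst hp0
      rw [hp2_loop]
      simp [PySem.Int.bitLength_zero]
    · rw [hp2_loop, dif_neg h, shiftRight_one_nonneg p hp]
      obtain ⟨m, rfl⟩ := Int.eq_ofNat_of_zero_le hp
      rw [show PySem.Int.floordiv (m : Int) 2 = ((m / 2 : Nat) : Int) from by exact_mod_cast PySem.Int.floordiv_natCast m 2]
      have hm : 0 < m := by omega
      rw [ih ((m / 2 : Nat) : Int) (c + 1) (by positivity) (by omega)]
      rw [PySem.Int.bitLength_natCast hm]
      push_cast
      ring

-- n & -n for positive n, read off PySem.Int.band's mixed-sign branch.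
theorem band_neg_self (n : Int) (h : 1 ≤ n) :
    PySem.Int.band n (-n) = ((n.toNat - (n.toNat &&& (n.toNat - 1))) : Nat) := by
  unfold PySem.Int.band
  rw [if_pos (by omega), if_neg (by omega),
      show (- -n - 1).toNat = n.toNat - 1 from by omega]

-- a odd: a &&& (a-1) clears only bit 0, i.e. equals a - 1.
theorem nat_land_pred_odd (k : Nat) : (2*k+1) &&& (2*k) = 2*k := by
  apply Nat.eq_of_testBit_eq
  intro i
  cases i with
  | zero =>
    rw [Nat.testBit_land]
    have e1 : (2*k+1) % 2 = 1 := by omega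
    have e2 : (2*k) % 2 = 0 := by omega
    simp [Nat.testBit_zero, e1, e2]
  | succ i =>
    have h1 : (2*k+1)/2 = k := by omega
    have h2 : (2*k)/2 = k := by omega
    rw [Nat.testBit_land]
    simp [Nat.testBit_succ, h1, h2]

-- doubling shifts the mask: (2b) &&& (2b-1) = 2·(b &&& (b-1)).
theorem nat_land_pred_double (b : Nat) (hb : 1 ≤ b) :
    (2*b) &&& (2*b-1) = 2 * (b &&& (b-1)) := by
  apply Nat.eq_of_testBit_eq
  intro i
  cases i with
  | zero =>
    simp [Nat.testBit_zero, Nat.mul_mod_right]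
  | succ i =>
    have h1 : (2*b)/2 = b := by omega
    have h2 : (2*b-1)/2 = b-1 := by omega
    have h3 : (2*(b &&& (b-1)))/2 = b &&& (b-1) := by omega
    rw [Nat.testBit_land]
    simp only [Nat.testBit_succ, h1, h2, h3]
    rw [Nat.testBit_land]

theorem tz_loop_shift : ∀ (k : Nat) (n c : Int), n.toNat ≤ k →
    tz_loop n c = c + tz_loop n 0 := by
  intro k
  induction k with
  | zero =>
    intro n c hn
    have h : n ≤ 0 ∨ PySem.Int.mod n 2 ≠ 0 := Or.inl (by omega)
    rw [tz_loop, dif_pos h, tz_loop, dif_pos h]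
    ring
  | succ k ih =>
    intro n c hn
    by_cases h : n ≤ 0 ∨ PySem.Int.mod n 2 ≠ 0
    · rw [tz_loop, dif_pos h, tz_loop, dif_pos h]; ring
    · have hpos : ¬ n ≤ 0 := fun hh => h (Or.inl hh)
      have hmod0 : PySem.Int.mod n 2 = 0 := by
        by_contra hh; exact h (Or.inr hh)
      have hmod0' : n % 2 = 0 := by
        rwa [PySem.Int.mod_eq_emod_of_pos (by norm_num)] at hmod0
      have hdiv : PySem.Int.floordiv n 2 = n / 2 :=
        PySem.Int.floordiv_eq_ediv_of_pos (by norm_num)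
      have hle : (PySem.Int.floordiv n 2).toNat ≤ k := by rw [hdiv]; omega
      rw [tz_loop, dif_neg h]
      conv_rhs => rw [tz_loop, dif_neg h]
      rw [ih _ (c+1) hle, ih _ (0+1) hle]
      ring

-- the heart: A's mask-and-shift count (via its bitLength characterisation) equals B's valuation
-- loop, together with positivity of the mask (needed to step through the even case).
theorem main_eq : ∀ (k : Nat) (n : Int), 1 ≤ n → n.toNat ≤ k →
    ((PySem.Int.bitLength (PySem.Int.band n (-n)) : Int) - 1 = tz_loop n 0
      ∧ 1 ≤ PySem.Int.band n (-n)) := by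
  intro k
  induction k with
  | zero => intro n h1 h2; omega
  | succ k ih =>
    intro n h1 hn
    have hmod := Int.emod_two_eq n
    rw [band_neg_self n h1]
    by_cases hodd : n % 2 = 1
    · -- odd: mask is 1, loop stops at once
      obtain ⟨j, hj⟩ : ∃ j, n.toNat = 2*j+1 := ⟨n.toNat/2, by omega⟩
      rw [hj, show 2*j+1-1 = 2*j from by omega, nat_land_pred_odd]
      have hmask : ((2*j+1 - 2*j : Nat) : Int) = 1 := by omega
      rw [hmask]
      have hguard : n ≤ 0 ∨ PySem.Int.mod n 2 ≠ 0 := by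
        right
        rw [PySem.Int.mod_eq_emod_of_pos (by norm_num)]
        omega
      rw [tz_loop, dif_pos hguard]
      refine ⟨?_, by norm_num⟩
      norm_num [show PySem.Int.bitLength 1 = 1 from by decide]
    · -- even: n = 2m, mask doubles, count increments
      have he : n % 2 = 0 := by omega
      have hdiv : PySem.Int.floordiv n 2 = n / 2 :=
        PySem.Int.floordiv_eq_ediv_of_pos (by norm_num)
      set m := n / 2 with hm
      have hm1 : 1 ≤ m := by omega
      have hb : n.toNat = 2 * m.toNat := by omega
      have hland := nat_land_pred_double m.toNat (by omega)
      have hle : (m.toNat &&& (m.toNat - 1)) ≤ m.toNat - 1 :=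
        le_trans Nat.and_le_right (by omega)
      obtain ⟨ihEq, ihPos⟩ := ih m hm1 (by omega)
      rw [band_neg_self m hm1] at ihEq ihPos
      have hmaskNat : n.toNat - (n.toNat &&& (n.toNat - 1))
          = 2 * (m.toNat - (m.toNat &&& (m.toNat - 1))) := by
        rw [hb, hland]; omega
      rw [hmaskNat]
      have hcast : ((2 * (m.toNat - (m.toNat &&& (m.toNat - 1))) : Nat) : Int)
          = 2 * ((m.toNat - (m.toNat &&& (m.toNat - 1)) : Nat) : Int) := by push_cast; ring
      rw [hcast]
      set P : Int := ((m.toNat - (m.toNat &&& (m.toNat - 1)) : Nat) : Int) with hP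
      have hbl : PySem.Int.bitLength (2 * P) = PySem.Int.bitLength P + 1 := by
        rw [PySem.Int.bitLength_of_pos (by omega)]
        congr 2
        rw [PySem.Int.floordiv_eq_ediv_of_pos (by norm_num)]
        omega
      have hguard : ¬ (n ≤ 0 ∨ PySem.Int.mod n 2 ≠ 0) := by
        rintro (hh | hh)
        · omega
        · exact hh (by rw [PySem.Int.mod_eq_emod_of_pos (by norm_num)]; omega)
      rw [tz_loop, dif_neg hguard, hdiv,
          tz_loop_shift m.toNat m (0+1) le_rfl]
      constructor
      · rw [hbl]; push_cast; omega
      · omega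

-- ===== VERDICT (by name: the statement is the Claim_ definition above) =====
theorem highest_power_of_2_spec : Claim_equal_highest_power_of_2 := by
  intro num _hdom
  unfold Spec_highest_power_of_2 highest_power_of_2 highest_power_of_2_alt
  by_cases h : num < 1
  · simp [h]
  · rw [if_neg h, if_neg h]
    have hnot : Int.not (num - 1) = -num := by rw [int_not_eq]; ring
    rw [hnot]
    have hnn : 0 ≤ PySem.Int.band num (-num) :=
      PySem.Int.band_nonneg_of_nonneg_left _ (by omega)
    rw [hp2_loop_eq (PySem.Int.band num (-num)).toNat _ 0 hnn le_rfl]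
    obtain ⟨hmain, -⟩ := main_eq num.toNat num (by omega) le_rfl
    congr 1
    omega
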